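-- pv_equiv track=rewrite | github.com/janekc/deltabot_plugins | plugins/simplebot_checkers/simplebot_checkers/game.py | position2coord
-- ===== SOURCE A (Python) =====
-- def position2coord(position: int) -> tuple:
--     pos = 1
--     for i in range(8):
--         for j in range(8):
--             if (i+j+1) % 2 == 0:
--                 if pos == position:
--                     return (i, j)
--                 pos += 1
--     return (-1, -1)
-- ===== SOURCE B (Python) =====
-- def position2coord(position: int) -> tuple:
--     if 1 <= position <= 32:
--         row, k = divmod(position - 1, 4)
--         return (row, 2 * k + (1 if row % 2 == 0 else 0))
--     return (-1, -1)
-- ===== Notes on version B (the rewrite author's own statement) =====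
-- stated objective: simpler
-- what changed: Replaces the nested scan over the whole board with a direct closed-form computation: row and column are obtained from the position by floor division and remainder plus a row-parity offset, guarded by a range check.
import Mathlib
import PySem

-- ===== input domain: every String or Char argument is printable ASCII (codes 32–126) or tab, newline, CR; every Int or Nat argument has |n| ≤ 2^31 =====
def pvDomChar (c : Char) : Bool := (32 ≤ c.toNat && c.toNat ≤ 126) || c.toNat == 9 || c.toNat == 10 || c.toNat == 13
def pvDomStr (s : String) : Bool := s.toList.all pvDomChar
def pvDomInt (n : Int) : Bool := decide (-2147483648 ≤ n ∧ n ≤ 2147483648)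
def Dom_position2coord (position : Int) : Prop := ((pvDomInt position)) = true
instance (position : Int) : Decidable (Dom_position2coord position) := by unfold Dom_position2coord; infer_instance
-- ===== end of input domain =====

-- B replaces A's 64-iteration nested board scan with a closed-form arithmetic computation; objective: simpler.

-- ===== PORT A =====
-- inner loop body: state is (pos counter, early-return value if already found)
def pcStep (position i : Int) (s : Int × Option (Int × Int)) (j : Int) : Int × Option (Int × Int) :=
  match s with
  | (pos, some r) => (pos, some r)
  | (pos, none) =>
    if PySem.Int.mod (i + j + 1) 2 == 0 then
      if pos == position then (pos, some (i, j)) else (pos + 1, none)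
    else (pos, none)

-- inner 'for j in range(8)' loop
def pcRow (position : Int) (s : Int × Option (Int × Int)) (i : Int) : Int × Option (Int × Int) :=
  (PySem.List.pyRange 0 8 1).foldl (pcStep position i) s

-- outer 'for i in range(8)' loop; falls through to (-1, -1) when no square matched
def position2coord (position : Int) : Int × Int :=
  match ((PySem.List.pyRange 0 8 1).foldl (pcRow position) ((1 : Int), none)).2 with
  | some r => r
  | none => (-1, -1)

-- ===== PORT B =====
def position2coord_alt (position : Int) : Int × Int :=
  if 1 ≤ position ∧ position ≤ 32 then
    let row := PySem.Int.floordiv (position - 1) 4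
    let k := PySem.Int.mod (position - 1) 4
    (row, 2 * k + (if PySem.Int.mod row 2 == 0 then 1 else 0))
  else (-1, -1)

-- ===== PRECONDITION & SPEC =====
def Spec_position2coord (position : Int) (out : Int × Int) : Prop := out = position2coord_alt position
instance (position : Int) (out : Int × Int) : Decidable (Spec_position2coord position out) := by unfold Spec_position2coord; infer_instance

-- ===== CLAIM (what is proved, stated in full; the proofs are below) =====
def Claim_equal_position2coord : Prop := ∀ (position : Int), Dom_position2coord position → Spec_position2coord position (position2coord position)

-- ===== LEMMAS AND PROOFS =====
theorem pcStep_skip (position i j pos : Int) (h : (PySem.Int.mod (i + j + 1) 2 == 0) = false) :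
    pcStep position i (pos, none) j = (pos, none) := by
  unfold pcStep; rw [h]; rfl

theorem pcStep_count (position i j pos : Int) (h : (PySem.Int.mod (i + j + 1) 2 == 0) = true)
    (hp : (pos == position) = false) :
    pcStep position i (pos, none) j = (pos + 1, none) := by
  unfold pcStep; rw [h]; simp [hp]

-- invariant of the inner loop: while the counter never hits `position`, no result is produced
-- and the counter advances by the number of dark squares scanned
theorem pcStep_foldl_none (position i : Int) (js : List Int) (pos : Int)
    (hk : ∀ k : Int, pos ≤ k → k < pos + js.countP (fun j => PySem.Int.mod (i + j + 1) 2 == 0) →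
      (k == position) = false) :
    js.foldl (pcStep position i) (pos, none)
      = (pos + js.countP (fun j => PySem.Int.mod (i + j + 1) 2 == 0), none) := by
  induction js generalizing pos with
  | nil => simp
  | cons j js ih =>
    rw [List.foldl_cons]
    rcases hcond : (PySem.Int.mod (i + j + 1) 2 == 0) with _ | _
    · have hc : (j :: js).countP (fun j => PySem.Int.mod (i + j + 1) 2 == 0)
          = js.countP (fun j => PySem.Int.mod (i + j + 1) 2 == 0) := by
        simp only [List.countP_cons, hcond]; rfl
      rw [hc] at hk ⊢
      rw [pcStep_skip position i j pos hcond]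
      exact ih pos hk
    · have hc : (j :: js).countP (fun j => PySem.Int.mod (i + j + 1) 2 == 0)
          = js.countP (fun j => PySem.Int.mod (i + j + 1) 2 == 0) + 1 := by
        rw [List.countP_cons, hcond]; simp
      rw [hc] at hk ⊢
      have hpos : (pos == position) = false :=
        hk pos le_rfl (by push_cast; omega)
      rw [pcStep_count position i j pos hcond hpos]
      rw [ih (pos + 1) (fun k h1 h2 => hk k (by omega) (by push_cast at h2 ⊢; omega))]
      congr 1
      push_cast
      ring

theorem position2coord_out_of_range (position : Int) (h : position < 1 ∨ 32 < position) :
    position2coord position = (-1, -1) := by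
  have hk : ∀ k : Int, 1 ≤ k → k < 33 → (k == position) = false := fun k h1 h2 =>
    beq_eq_false_iff_ne.mpr (by omega)
  have hr : PySem.List.pyRange 0 8 1 = [0,1,2,3,4,5,6,7] := by decide
  have row : ∀ i pos : Int,
      (([0,1,2,3,4,5,6,7] : List Int).countP (fun j => PySem.Int.mod (i + j + 1) 2 == 0) = 4) →
      1 ≤ pos → pos + 4 ≤ 33 → pcRow position (pos, none) i = (pos + 4, none) := by
    intro i pos hcnt h1 h2
    rw [pcRow, hr]
    rw [pcStep_foldl_none position i _ pos
      (by rw [hcnt]; intro k hk1 hk2; exact hk k (by omega) (by push_cast at hk2; omega)), hcnt]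
    norm_num
  have hfin : (PySem.List.pyRange 0 8 1).foldl (pcRow position) ((1 : Int), none) = (33, none) := by
    rw [hr]
    simp only [List.foldl_cons, List.foldl_nil]
    rw [row 0 1 (by decide) (by omega) (by omega),
        row 1 (1+4) (by decide) (by omega) (by omega),
        row 2 (1+4+4) (by decide) (by omega) (by omega),
        row 3 (1+4+4+4) (by decide) (by omega) (by omega),
        row 4 (1+4+4+4+4) (by decide) (by omega) (by omega),
        row 5 (1+4+4+4+4+4) (by decide) (by omega) (by omega),
        row 6 (1+4+4+4+4+4+4) (by decide) (by omega) (by omega),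
        row 7 (1+4+4+4+4+4+4+4) (by decide) (by omega) (by omega)]
    norm_num
  unfold position2coord
  rw [hfin]

theorem position2coord_alt_out_of_range (position : Int) (h : position < 1 ∨ 32 < position) :
    position2coord_alt position = (-1, -1) := by
  unfold position2coord_alt
  rw [if_neg (by omega)]

-- ===== VERDICT (by name: the statement is the Claim_ definition above) =====
theorem position2coord_spec : Claim_equal_position2coord := by
  intro position _
  unfold Spec_position2coord
  by_cases h : 1 ≤ position ∧ position ≤ 32
  · obtain ⟨h1, h2⟩ := h
    interval_cases position <;> decide
  · rw [position2coord_out_of_range position (by omega),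
        position2coord_alt_out_of_range position (by omega)]
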